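-- pv_equiv track=rewrite | github.com/RyanBacildo/Estudos | Álgebra Linear/Trabalhos/Projetos/Trabalho Álgebra Linear/boxtool/matrizes/__init__.py | matriz_inversa_mod
-- ===== SOURCE A (Python) =====
-- def inverso_modular(a, m):
--     for i in range(m):
--         if (a * i) % m == 1:
--             return i
--     return None
--
-- def determinante_3x3(matriz):
--     a, b, c = matriz[0]
--     d, e, f = matriz[1]
--     g, h, i = matriz[2]
--     det = a * (e * i - f * h) - b * (d * i - f * g) + c * (d * h - e * g)
--     return det
--
-- def matriz_adjunta(matriz):
--     a, b, c = matriz[0]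
--     d, e, f = matriz[1]
--     g, h, i = matriz[2]
--
--     cofator_11 = (e * i - f * h)
--     cofator_12 = -(d * i - f * g)
--     cofator_13 = (d * h - e * g)
--     cofator_21 = -(b * i - c * h)
--     cofator_22 = (a * i - c * g)
--     cofator_23 = -(a * h - b * g)
--     cofator_31 = (b * f - c * e)
--     cofator_32 = -(a * f - c * d)
--     cofator_33 = (a * e - b * d)
--
--     adjunta = [
--         [cofator_11, cofator_21, cofator_31],
--         [cofator_12, cofator_22, cofator_32],
--         [cofator_13, cofator_23, cofator_33]
--     ]
--     return adjunta
--
-- def matriz_inversa_mod(matriz):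
--     det = determinante_3x3(matriz)
--     det_mod = det % 26
--     inv_det = inverso_modular(det_mod, 26)
--     if inv_det is None:
--         raise ValueError("A matriz não é inversível mod 26.")
--
--     adjunta = matriz_adjunta(matriz)
--     inversa = [[(inv_det * adjunta[i][j]) % 26 for j in range(3)] for i in range(3)]
--     return inversa
-- ===== SOURCE B (Python) =====
-- def _egcd(a, b):
--     # iterative extended Euclid: returns (g, x) with x*a + (some y)*b == g
--     old_r, r = a, b
--     old_s, s = 1, 0
--     while r != 0:
--         q = old_r // r
--         old_r, r = r, old_r - q * r
--         old_s, s = s, old_s - q * s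
--     return old_r, old_s
--
-- def _minor_det(rows, skip_col):
--     m = [row[:skip_col] + row[skip_col + 1:] for row in rows]
--     return m[0][0] * m[1][1] - m[0][1] * m[1][0]
--
-- def matriz_inversa_mod(matriz):
--     det = 0
--     for j in range(3):
--         sign = 1 if j % 2 == 0 else -1
--         det += sign * matriz[0][j] * _minor_det([matriz[1], matriz[2]], j)
--     g, x = _egcd(det % 26, 26)
--     if g != 1:
--         raise ValueError("A matriz não é inversível mod 26.")
--     inv_det = x % 26
--     inversa = []
--     for i in range(3):
--         linha = []
--         for j in range(3):
--             rows = [matriz[r] for r in range(3) if r != j]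
--             cof = (-1) ** (i + j) * _minor_det(rows, i)
--             linha.append((inv_det * cof) % 26)
--         inversa.append(linha)
--     return inversa
-- ===== Notes on version B (the rewrite author's own statement) =====
-- stated objective: alternative
-- what changed: The brute-force 0..25 scan for the modular inverse is replaced by the extended Euclidean algorithm, and the hand-unrolled nine-cofactor adjugate table is replaced by index loops that delete a row/column and take signed 2x2 minor determinants.
import Mathlib
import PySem

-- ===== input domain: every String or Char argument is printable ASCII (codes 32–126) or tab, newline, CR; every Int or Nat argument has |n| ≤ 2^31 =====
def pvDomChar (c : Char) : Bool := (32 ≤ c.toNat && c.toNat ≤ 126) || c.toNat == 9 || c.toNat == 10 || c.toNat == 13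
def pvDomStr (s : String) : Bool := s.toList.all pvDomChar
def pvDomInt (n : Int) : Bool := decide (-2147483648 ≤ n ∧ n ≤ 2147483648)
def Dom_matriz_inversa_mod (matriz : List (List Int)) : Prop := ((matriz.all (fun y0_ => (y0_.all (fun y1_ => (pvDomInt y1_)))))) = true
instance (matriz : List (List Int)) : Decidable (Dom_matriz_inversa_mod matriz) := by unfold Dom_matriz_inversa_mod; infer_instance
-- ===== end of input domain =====

-- B replaces the brute-force modular-inverse scan by the extended Euclidean algorithm and the
-- unrolled cofactor table by an index loop over minors (objective: alternative; return value only —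
-- on non-invertible matrices both Pythons raise ValueError, excluded by Pre_).

-- ===== PORT A =====
def inverso_modular (a m : Int) : Option Int :=
  (PySem.List.pyRange 0 m 1).foldl
    (fun acc i => match acc with
      | some _ => acc
      | none => if PySem.Int.mod (a * i) m = 1 then some i else none) none

def determinante_3x3 (matriz : List (List Int)) : Int :=
  match matriz with
  | [a, b, c] :: [d, e, f] :: [g, h, i] :: _ =>
      a * (e * i - f * h) - b * (d * i - f * g) + c * (d * h - e * g)
  | _ => 0  -- Python raises (unpacking/IndexError) on any other shape; excluded by Pre_

def matriz_adjunta (matriz : List (List Int)) : List (List Int) :=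
  match matriz with
  | [a, b, c] :: [d, e, f] :: [g, h, i] :: _ =>
      [[(e * i - f * h), -(b * i - c * h), (b * f - c * e)],
       [-(d * i - f * g), (a * i - c * g), -(a * f - c * d)],
       [(d * h - e * g), -(a * h - b * g), (a * e - b * d)]]
  | _ => []  -- Python raises on any other shape; excluded by Pre_

def matriz_inversa_mod (matriz : List (List Int)) : List (List Int) :=
  let det := determinante_3x3 matriz
  let det_mod := PySem.Int.mod det 26
  match inverso_modular det_mod 26 with
  | none => []  -- Python raises ValueError here; excluded by Pre_
  | some inv_det =>
    let adjunta := matriz_adjunta matriz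
    (PySem.List.pyRange 0 3 1).map (fun i =>
      (PySem.List.pyRange 0 3 1).map (fun j =>
        PySem.Int.mod (inv_det * PySem.List.pyGetD (PySem.List.pyGetD adjunta i []) j 0) 26))

-- ===== PORT B =====
-- iterative extended Euclid (_egcd in Source B); the Nat fuel only makes the while-loop total
def pvEgcdAux : Nat → Int → Int → Int → Int → Int × Int
  | 0, oldr, _, olds, _ => (oldr, olds)
  | fuel + 1, oldr, r, olds, s =>
    if r = 0 then (oldr, olds)
    else
      let q := PySem.Int.floordiv oldr r
      pvEgcdAux fuel r (oldr - q * r) s (olds - q * s)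

def pvEgcd (a b : Int) : Int × Int := pvEgcdAux (a.natAbs + b.natAbs + 1) a b 1 0

-- _minor_det in Source B: 2x2 determinant of rows with column skip_col removed
def pvMinorDet (rows : List (List Int)) (skipCol : Int) : Int :=
  let m := rows.map (fun row =>
    PySem.List.slice row none (some skipCol) ++ PySem.List.slice row (some (skipCol + 1)) none)
  PySem.List.pyGetD (PySem.List.pyGetD m 0 []) 0 0 * PySem.List.pyGetD (PySem.List.pyGetD m 1 []) 1 0
    - PySem.List.pyGetD (PySem.List.pyGetD m 0 []) 1 0 * PySem.List.pyGetD (PySem.List.pyGetD m 1 []) 0 0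

def matriz_inversa_mod_alt (matriz : List (List Int)) : List (List Int) :=
  let det := (PySem.List.pyRange 0 3 1).foldl (fun det j =>
      let sign : Int := if PySem.Int.mod j 2 = 0 then 1 else -1
      det + sign * PySem.List.pyGetD (PySem.List.pyGetD matriz 0 []) j 0 *
        pvMinorDet [PySem.List.pyGetD matriz 1 [], PySem.List.pyGetD matriz 2 []] j) 0
  let gx := pvEgcd (PySem.Int.mod det 26) 26
  if gx.1 ≠ 1 then []  -- Python raises ValueError here; excluded by Pre_
  else
    let inv_det := PySem.Int.mod gx.2 26
    (PySem.List.pyRange 0 3 1).map (fun i =>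
      (PySem.List.pyRange 0 3 1).map (fun j =>
        let rows := ((PySem.List.pyRange 0 3 1).filter (fun r => r ≠ j)).map
          (fun r => PySem.List.pyGetD matriz r [])
        let cof := (-1 : Int) ^ (i + j).toNat * pvMinorDet rows i
        PySem.Int.mod (inv_det * cof) 26))

-- ===== PRECONDITION & SPEC =====
-- the 3x3 determinant read directly off the entries (used only to state Pre_)
def pvDetOf (m : List (List Int)) : Int :=
  let e := fun (i j : Nat) => (m.getD i []).getD j 0
  e 0 0 * (e 1 1 * e 2 2 - e 1 2 * e 2 1)
    - e 0 1 * (e 1 0 * e 2 2 - e 1 2 * e 2 0)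
    + e 0 2 * (e 1 0 * e 2 1 - e 1 1 * e 2 0)

-- Pre_ excludes inputs on which Python A raises: matrices whose first three rows are not all of
-- length exactly 3 / with fewer than 3 rows (unpacking or IndexError), and matrices whose
-- determinant is not invertible mod 26 (ValueError).
def Pre_matriz_inversa_mod (matriz : List (List Int)) : Prop :=
  3 ≤ matriz.length ∧ (∀ r ∈ matriz.take 3, r.length = 3) ∧ Int.gcd (pvDetOf matriz) 26 = 1

instance (matriz : List (List Int)) : Decidable (Pre_matriz_inversa_mod matriz) := by
  unfold Pre_matriz_inversa_mod; infer_instance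

def pvWitness_matriz_inversa_mod : List (List Int) := [[1, 0, 0], [0, 1, 0], [0, 0, 1]]

def Spec_matriz_inversa_mod (matriz : List (List Int)) (out : List (List Int)) : Prop := out = matriz_inversa_mod_alt matriz
instance (matriz : List (List Int)) (out : List (List Int)) : Decidable (Spec_matriz_inversa_mod matriz out) := by unfold Spec_matriz_inversa_mod; infer_instance

-- ===== CLAIM (what is proved, stated in full; the proofs are below) =====
def Claim_equal_matriz_inversa_mod : Prop := ∀ (matriz : List (List Int)), Dom_matriz_inversa_mod matriz → Pre_matriz_inversa_mod matriz → Spec_matriz_inversa_mod matriz (matriz_inversa_mod matriz)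

-- ===== LEMMAS AND PROOFS =====
-- brute-force inverse mod 26 agrees with extended Euclid on every residue
lemma inv_corr (d : Int) (h0 : 0 ≤ d) (h1 : d < 26) :
    inverso_modular d 26 =
      (if (pvEgcd d 26).1 = 1 then some (PySem.Int.mod (pvEgcd d 26).2 26) else none) := by
  interval_cases d <;> decide

lemma egcd_gcd (d : Int) (h0 : 0 ≤ d) (h1 : d < 26) :
    ((pvEgcd d 26).1 = 1 ↔ Int.gcd d 26 = 1) := by
  interval_cases d <;> decide

lemma minor0 (p q r u v w : Int) : pvMinorDet [[p,q,r],[u,v,w]] 0 = q*w - r*v := rfl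
lemma minor1 (p q r u v w : Int) : pvMinorDet [[p,q,r],[u,v,w]] 1 = p*w - r*u := rfl
lemma minor2 (p q r u v w : Int) : pvMinorDet [[p,q,r],[u,v,w]] 2 = p*v - q*u := rfl

set_option maxHeartbeats 2000000 in
lemma main_aux (a b c d e f g h i : Int) (rest : List (List Int))
    (hgcd : Int.gcd (pvDetOf ([a,b,c]::[d,e,f]::[g,h,i]::rest)) 26 = 1) :
    matriz_inversa_mod ([a,b,c]::[d,e,f]::[g,h,i]::rest) =
      matriz_inversa_mod_alt ([a,b,c]::[d,e,f]::[g,h,i]::rest) := by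
  have hrange : PySem.List.pyRange 0 3 1 = [0, 1, 2] := by decide
  have g0 : PySem.List.pyGetD ([a,b,c]::[d,e,f]::[g,h,i]::rest) 0 [] = [a,b,c] := by
    simp [PySem.List.pyGetD_ofNat']
  have g1 : PySem.List.pyGetD ([a,b,c]::[d,e,f]::[g,h,i]::rest) 1 [] = [d,e,f] := by
    simp [PySem.List.pyGetD_ofNat']
  have g2 : PySem.List.pyGetD ([a,b,c]::[d,e,f]::[g,h,i]::rest) 2 [] = [g,h,i] := by
    simp [PySem.List.pyGetD_ofNat']
  set D : Int := a*(e*i - f*h) - b*(d*i - f*g) + c*(d*h - e*g) with hD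
  have hdet : pvDetOf ([a,b,c]::[d,e,f]::[g,h,i]::rest) = D := by simp [pvDetOf, hD]; try ring
  have hdetB : ((PySem.List.pyRange 0 3 1).foldl (fun det j =>
      det + (if PySem.Int.mod j 2 = 0 then (1:Int) else -1) * PySem.List.pyGetD (PySem.List.pyGetD ([a,b,c]::[d,e,f]::[g,h,i]::rest) 0 []) j 0 *
        pvMinorDet [PySem.List.pyGetD ([a,b,c]::[d,e,f]::[g,h,i]::rest) 1 [], PySem.List.pyGetD ([a,b,c]::[d,e,f]::[g,h,i]::rest) 2 []] j) 0) = D := by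
    rw [hrange]
    simp only [List.foldl, g0, g1, g2, minor0, minor1, minor2,
      show PySem.Int.mod (0:Int) 2 = 0 from by decide,
      show PySem.Int.mod (1:Int) 2 = 1 from by decide,
      show PySem.Int.mod (2:Int) 2 = 0 from by decide,
      PySem.List.pyGetD_ofNat']
    norm_num [List.getD]
    ring
  have hAdet : determinante_3x3 ([a,b,c]::[d,e,f]::[g,h,i]::rest) = D := rfl
  have hdm0 : 0 ≤ PySem.Int.mod D 26 := PySem.Int.mod_nonneg D (by norm_num)
  have hdm1 : PySem.Int.mod D 26 < 26 := PySem.Int.mod_lt D (by norm_num)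
  have hgcd' : Int.gcd (PySem.Int.mod D 26) 26 = 1 := by
    rw [PySem.Int.mod_eq_emod_of_pos (by norm_num), Int.gcd_emod]
    rw [hdet] at hgcd; exact hgcd
  have hg1 : (pvEgcd (PySem.Int.mod D 26) 26).1 = 1 := (egcd_gcd _ hdm0 hdm1).mpr hgcd'
  have hinv : inverso_modular (PySem.Int.mod D 26) 26
      = some (PySem.Int.mod (pvEgcd (PySem.Int.mod D 26) 26).2 26) := by
    rw [inv_corr _ hdm0 hdm1, if_pos hg1]
  delta matriz_inversa_mod matriz_inversa_mod_alt
  simp only [hAdet, hdetB, hinv, hg1]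
  rw [if_neg (by simp)]
  rw [hrange]
  simp only [List.map, List.filter, matriz_adjunta]
  norm_num [PySem.List.pyGetD_ofNat', List.getD, g0, g1, g2, minor0, minor1, minor2]
  and_intros <;> (congr 1; norm_num [Int.toNat])

-- ===== VERDICT (by name: the statement is the Claim_ definition above) =====
theorem matriz_inversa_mod_spec : Claim_equal_matriz_inversa_mod := by
  intro matriz _ hpre
  obtain ⟨hlen, hrows, hgcd⟩ := hpre
  unfold Spec_matriz_inversa_mod
  rcases matriz with _ | ⟨r0, _ | ⟨r1, _ | ⟨r2, rest⟩⟩⟩ <;> simp at hlen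
  have h0 : r0.length = 3 := hrows r0 (by simp)
  have h1 : r1.length = 3 := hrows r1 (by simp)
  have h2 : r2.length = 3 := hrows r2 (by simp)
  obtain ⟨a, b, c, rfl⟩ := List.length_eq_three.mp h0
  obtain ⟨d, e, f, rfl⟩ := List.length_eq_three.mp h1
  obtain ⟨g, h, i, rfl⟩ := List.length_eq_three.mp h2
  exact main_aux a b c d e f g h i rest hgcd
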